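-- pv_equiv track=rewrite | github.com/skrstv123/CP-ALGO | dsa/cfcomps/kn.py | ltk
-- ===== SOURCE A (Python) =====
-- def ltk(x,k,s):
--     c = 0
--     for l in range(1,1+s):
--         # closest multiple of l
--         if s*l<x:
--             c+=s
--             continue
--
--         p = x//l
--         if x%l==0: p-=1
--         if p>0: c+=p
--     return c<k
-- ===== SOURCE B (Python) =====
-- def ltk(x, k, s):
--     # Divisor-block (hyperbola) summation: O(sqrt(x)) instead of A's O(s) loop.
--     if s < 1 or x <= 1:
--         return 0 < k
--     y = x - 1
--     m = y // s
--     if m > s: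
--         m = s
--     c = m * s
--     l = m + 1
--     while l <= s:
--         q = y // l
--         if q == 0:
--             break
--         r = y // q
--         if r > s:
--             r = s
--         c += q * (r - l + 1)
--         l = r + 1
--     return c < k
-- ===== Notes on version B (the rewrite author's own statement) =====
-- stated objective: faster
-- what changed: Replaced A's O(s) loop over every l in 1..s by a closed-form count m=min((x-1)//s,s) for the s-branch plus a divisor-block (hyperbola) floor-sum of (x-1)//l over l in m+1..s, using that p = x//l - [l|x] = (x-1)//l.
import Mathlib
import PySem

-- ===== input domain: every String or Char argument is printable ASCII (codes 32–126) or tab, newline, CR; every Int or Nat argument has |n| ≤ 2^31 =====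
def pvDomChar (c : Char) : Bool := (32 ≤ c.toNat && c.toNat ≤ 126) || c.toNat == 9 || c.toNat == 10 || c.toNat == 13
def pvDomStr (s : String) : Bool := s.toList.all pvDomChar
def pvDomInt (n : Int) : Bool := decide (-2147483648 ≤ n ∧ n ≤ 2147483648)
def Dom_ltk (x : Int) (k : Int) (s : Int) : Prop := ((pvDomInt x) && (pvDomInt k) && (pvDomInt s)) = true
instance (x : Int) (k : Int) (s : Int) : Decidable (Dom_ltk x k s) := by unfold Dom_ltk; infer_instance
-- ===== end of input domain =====

-- B replaces A's O(s) loop by a closed-form count for the s-branch plus a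
-- divisor-block floor-sum of (x-1)//l (objective: faster, asymptotically).

-- ===== PORT A =====
def ltk (x : Int) (k : Int) (s : Int) : Bool :=
  let c := (PySem.List.pyRange 1 (1+s) 1).foldl (fun c l =>
    if s * l < x then
      c + s
    else
      let p := PySem.Int.floordiv x l
      let p := if PySem.Int.mod x l = 0 then p - 1 else p
      if 0 < p then c + p else c) 0
  decide (c < k)

-- ===== PORT B =====
-- the while loop of Source B; fuel only makes the recursion structural (l strictly
-- increases each pass, so fuel (s+1-l).toNat is never exhausted first)
def ltkAltLoop (y : Int) (s : Int) : Nat → Int → Int → Int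
  | 0, _, c => c
  | fuel+1, l, c =>
    if l ≤ s then
      let q := PySem.Int.floordiv y l
      if q = 0 then c
      else
        let r := PySem.Int.floordiv y q
        let r := if r > s then s else r
        ltkAltLoop y s fuel (r + 1) (c + q * (r - l + 1))
    else c

def ltk_alt (x : Int) (k : Int) (s : Int) : Bool :=
  if s < 1 ∨ x ≤ 1 then decide ((0:Int) < k)
  else
    let y := x - 1
    let m := PySem.Int.floordiv y s
    let m := if m > s then s else m
    let c := ltkAltLoop y s (s - m).toNat (m + 1) (m * s)
    decide (c < k)

-- ===== PRECONDITION & SPEC =====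
def Spec_ltk (x : Int) (k : Int) (s : Int) (out : Bool) : Prop := out = ltk_alt x k s
instance (x : Int) (k : Int) (s : Int) (out : Bool) : Decidable (Spec_ltk x k s out) := by unfold Spec_ltk; infer_instance

-- ===== CLAIM (what is proved, stated in full; the proofs are below) =====
def Claim_equal_ltk : Prop := ∀ (x : Int) (k : Int) (s : Int), Dom_ltk x k s → Spec_ltk x k s (ltk x k s)

-- ===== LEMMAS AND PROOFS =====

-- sum of floordiv y j for j = lo .. hi
def isum (y lo hi : Int) : Int :=
  ((PySem.List.pyRange lo (hi+1) 1).map (fun j => PySem.Int.floordiv y j)).sum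

theorem fd_nonneg (y l : Int) (hy : 0 ≤ y) (hl : 0 < l) : 0 ≤ PySem.Int.floordiv y l := by
  have h := (PySem.Int.le_floordiv_iff_mul_le (a := y) (q := 0) hl).mpr (by simpa using hy)
  exact h

theorem fd_mul_le (y l : Int) (hl : 0 < l) : PySem.Int.floordiv y l * l ≤ y := by
  have h1 := PySem.Int.floordiv_mul_add_mod y l
  have h2 := PySem.Int.mod_nonneg (a := y) (b := l) hl
  linarith

theorem fd_mono (y l j : Int) (hy : 0 ≤ y) (hl : 0 < l) (hlj : l ≤ j) :
    PySem.Int.floordiv y j ≤ PySem.Int.floordiv y l := by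
  rw [PySem.Int.le_floordiv_iff_mul_le hl]
  have h1 : PySem.Int.floordiv y j * j ≤ y := fd_mul_le y j (by omega)
  have h2 : 0 ≤ PySem.Int.floordiv y j := fd_nonneg y j hy (by omega)
  nlinarith

theorem fd_block (y l j : Int) (hy : 0 ≤ y) (hl : 0 < l) (hlj : l ≤ j)
    (hq : 0 < PySem.Int.floordiv y l) (hj : j ≤ PySem.Int.floordiv y (PySem.Int.floordiv y l)) :
    PySem.Int.floordiv y j = PySem.Int.floordiv y l := by
  have hjpos : 0 < j := by omega
  have h1 : PySem.Int.floordiv y j ≤ PySem.Int.floordiv y l := fd_mono y l j hy hl hlj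
  have h2 : PySem.Int.floordiv y l ≤ PySem.Int.floordiv y j := by
    rw [PySem.Int.le_floordiv_iff_mul_le hjpos]
    have h3 : j * PySem.Int.floordiv y l ≤ y := by
      have := (PySem.Int.le_floordiv_iff_mul_le (a := y) (q := j) hq).mp hj
      linarith [this]
    linarith [h3, mul_comm j (PySem.Int.floordiv y l)]
  omega

theorem fd_le_self_div (y l : Int) (hl : 0 < l) (hq : 0 < PySem.Int.floordiv y l) :
    l ≤ PySem.Int.floordiv y (PySem.Int.floordiv y l) := by
  rw [PySem.Int.le_floordiv_iff_mul_le hq]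
  have h1 := fd_mul_le y l hl
  nlinarith

-- p = x//l - [l|x]  equals  (x-1)//l
theorem p_eq (x l : Int) (hl : 0 < l) :
    (if PySem.Int.mod x l = 0 then PySem.Int.floordiv x l - 1 else PySem.Int.floordiv x l)
      = PySem.Int.floordiv (x-1) l := by
  have hd := PySem.Int.floordiv_mul_add_mod x l
  have hr0 := PySem.Int.mod_nonneg (a := x) (b := l) hl
  have hrl := PySem.Int.mod_lt (a := x) (b := l) hl
  by_cases h : PySem.Int.mod x l = 0
  · simp only [h, if_pos]
    rw [eq_comm, PySem.Int.floordiv_eq_iff_of_pos hl]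
    constructor
    · have : (PySem.Int.floordiv x l - 1) * l = PySem.Int.floordiv x l * l - l := by ring
      rw [this]; omega
    · have : (PySem.Int.floordiv x l - 1 + 1) * l = PySem.Int.floordiv x l * l := by ring
      rw [this]; omega
  · rw [if_neg h]
    rw [eq_comm, PySem.Int.floordiv_eq_iff_of_pos hl]
    constructor
    · omega
    · have : (PySem.Int.floordiv x l + 1) * l = PySem.Int.floordiv x l * l + l := by ring
      rw [this]; omega

theorem isum_nil (y lo hi : Int) (h : hi < lo) : isum y lo hi = 0 := by
  unfold isum
  rw [PySem.List.pyRange_one_eq_nil (by omega)]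
  simp

theorem isum_split (y lo mid hi : Int) (h1 : lo ≤ mid + 1) (h2 : mid ≤ hi) :
    isum y lo hi = isum y lo mid + isum y (mid+1) hi := by
  unfold isum
  rw [PySem.List.pyRange_one_append lo (mid+1) (hi+1) h1 (by omega), List.map_append, List.sum_append]

theorem isum_const (y lo hi q : Int) (h : lo ≤ hi + 1)
    (hc : ∀ j, lo ≤ j → j ≤ hi → PySem.Int.floordiv y j = q) :
    isum y lo hi = q * (hi - lo + 1) := by
  unfold isum
  have hm : (PySem.List.pyRange lo (hi+1) 1).map (fun j => PySem.Int.floordiv y j)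
      = (PySem.List.pyRange lo (hi+1) 1).map (fun _ => q) := by
    apply List.map_congr_left
    intro j hj
    rw [PySem.List.mem_pyRange_one] at hj
    exact hc j hj.1 (by omega)
  rw [hm, PySem.List.sum_map_const_int, PySem.List.length_pyRange_one]
  have : ((hi + 1 - lo).toNat : Int) = hi - lo + 1 := by omega
  rw [this]; ring

theorem loopB (y s : Int) (hy : 1 ≤ y) (fuel : Nat) (l c : Int) (hl : 1 ≤ l)
    (hfuel : s + 1 - l ≤ (fuel : Int)) :
    ltkAltLoop y s fuel l c = c + isum y l s := by
  induction fuel generalizing l c with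
  | zero =>
    simp only [ltkAltLoop]
    rw [isum_nil y l s (by exact_mod_cast by omega)]
    ring
  | succ n ih =>
    simp only [ltkAltLoop]
    by_cases hls : l ≤ s
    · rw [if_pos hls]
      have hy0 : (0:Int) ≤ y := by omega
      have hlpos : (0:Int) < l := by omega
      by_cases hq : PySem.Int.floordiv y l = 0
      · rw [if_pos hq]
        have : isum y l s = 0 := by
          have := isum_const y l s 0 (by omega) (fun j hj1 hj2 => by
            have h1 := fd_mono y l j hy0 hlpos hj1
            have h2 := fd_nonneg y j hy0 (by omega)
            omega)
          simpa using this
        omega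
      · rw [if_neg hq]
        have hqpos : 0 < PySem.Int.floordiv y l := by
          have := fd_nonneg y l hy0 hlpos; omega
        set q := PySem.Int.floordiv y l with hqdef
        set r := if PySem.Int.floordiv y q > s then s else PySem.Int.floordiv y q with hrdef
        have hlr : l ≤ r := by
          have := fd_le_self_div y l hlpos hqpos
          rw [hrdef]; split <;> omega
        have hrs : r ≤ s := by rw [hrdef]; split <;> omega
        have hblock : ∀ j, l ≤ j → j ≤ r → PySem.Int.floordiv y j = q := by
          intro j hj1 hj2
          have hgoal := fd_block y l j hy0 hlpos hj1 hqpos (by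
            rw [← hqdef]
            rw [hrdef] at hj2; split at hj2 <;> omega)
          rw [← hqdef] at hgoal; exact hgoal
        rw [ih (r+1) (c + q * (r - l + 1)) (by omega) (by
          push_cast at hfuel ⊢; omega)]
        rw [isum_split y l r s (by omega) hrs, isum_const y l r q (by omega) hblock]
        ring
    · rw [if_neg hls]
      rw [isum_nil y l s (by omega)]
      ring

theorem foldA (x s : Int) (li : List Int) (c0 : Int) :
    li.foldl (fun c l =>
      if s * l < x then
        c + s
      else
        let p := PySem.Int.floordiv x l
        let p := if PySem.Int.mod x l = 0 then p - 1 else p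
        if 0 < p then c + p else c) c0
    = c0 + (li.map (fun l =>
        if s * l < x then s
        else
          let p := PySem.Int.floordiv x l
          let p := if PySem.Int.mod x l = 0 then p - 1 else p
          if 0 < p then p else 0)).sum := by
  induction li generalizing c0 with
  | nil => simp
  | cons h t ih =>
    simp only [List.foldl_cons, List.map_cons, List.sum_cons]
    rw [ih]
    split_ifs <;> ring

-- ===== VERDICT (by name: the statement is the Claim_ definition above) =====
-- the per-element value of A's loop body
theorem gval_high (x s l : Int) (hs : 1 ≤ s) (hx : 2 ≤ x) (hl : 1 ≤ l) (_hls : l ≤ s)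
    (hgt : PySem.Int.floordiv (x-1) s < l) :
    (if s * l < x then s
     else
       let p := PySem.Int.floordiv x l
       let p := if PySem.Int.mod x l = 0 then p - 1 else p
       if 0 < p then p else 0) = PySem.Int.floordiv (x-1) l := by
  have hnot : ¬ (s * l < x) := by
    have hub := (PySem.Int.floordiv_eq_iff_of_pos (a := x-1) (b := s)
      (q := PySem.Int.floordiv (x-1) s) (by omega)).mp rfl
    nlinarith [hub.2]
  rw [if_neg hnot]
  simp only
  rw [p_eq x l (by omega)]
  have hp : 0 ≤ PySem.Int.floordiv (x-1) l := fd_nonneg (x-1) l (by omega) (by omega)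
  split_ifs with h
  · rfl
  · omega

theorem ltk_spec : Claim_equal_ltk := by
  intro x k s _dom
  simp only [Spec_ltk, ltk, ltk_alt]
  by_cases hs : s < 1
  · rw [if_pos (Or.inl hs)]
    rw [PySem.List.pyRange_one_eq_nil (by omega)]
    simp
  · by_cases hx : x ≤ 1
    · rw [if_pos (Or.inr hx)]
      rw [foldA]
      have hmap : (PySem.List.pyRange 1 (1+s) 1).map (fun l =>
          if s * l < x then s
          else
            let p := PySem.Int.floordiv x l
            let p := if PySem.Int.mod x l = 0 then p - 1 else p
            if 0 < p then p else 0)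
          = (PySem.List.pyRange 1 (1+s) 1).map (fun _ => (0:Int)) := by
        apply List.map_congr_left
        intro l hl
        rw [PySem.List.mem_pyRange_one] at hl
        have hnot : ¬ (s * l < x) := by nlinarith [hl.1, hl.2]
        rw [if_neg hnot]
        simp only
        rw [p_eq x l (by omega)]
        have hp : ¬ (0 < PySem.Int.floordiv (x-1) l) := by
          intro hpos
          have := (PySem.Int.le_floordiv_iff_mul_le (a := x-1) (b := l) (q := 1)
            (by omega)).mp (by omega)
          omega
        rw [if_neg hp]
      rw [hmap, PySem.List.sum_map_const_int]
      simp
    · -- main case: 1 ≤ s and 2 ≤ x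
      rw [if_neg (by omega)]
      set y := x - 1 with hy
      set q0 := PySem.Int.floordiv y s with hq0
      set m := if q0 > s then s else q0 with hm
      have hq0nn : 0 ≤ q0 := fd_nonneg y s (by omega) (by omega)
      have hm0 : 0 ≤ m := by rw [hm]; split <;> omega
      have hms : m ≤ s := by rw [hm]; split <;> omega
      -- B side
      rw [loopB y s (by omega) ((s-m).toNat) (m+1) (m*s) (by omega) (by omega)]
      -- A side
      rw [foldA]
      rw [PySem.List.pyRange_one_append 1 (m+1) (1+s) (by omega) (by omega),
        List.map_append, List.sum_append]
      have hmap1 : (PySem.List.pyRange 1 (m+1) 1).map (fun l =>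
          if s * l < x then s
          else
            let p := PySem.Int.floordiv x l
            let p := if PySem.Int.mod x l = 0 then p - 1 else p
            if 0 < p then p else 0)
          = (PySem.List.pyRange 1 (m+1) 1).map (fun _ => s) := by
        apply List.map_congr_left
        intro l hl
        rw [PySem.List.mem_pyRange_one] at hl
        have hlq0 : l ≤ q0 := by
          have : m ≤ q0 := by rw [hm]; split <;> omega
          omega
        have hlt : s * l < x := by
          have hmul := fd_mul_le y s (by omega)
          have : l * s ≤ q0 * s := by nlinarith
          nlinarith
        rw [if_pos hlt]
      have hmap2 : (PySem.List.pyRange (m+1) (1+s) 1).map (fun l =>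
          if s * l < x then s
          else
            let p := PySem.Int.floordiv x l
            let p := if PySem.Int.mod x l = 0 then p - 1 else p
            if 0 < p then p else 0)
          = (PySem.List.pyRange (m+1) (1+s) 1).map (fun l => PySem.Int.floordiv y l) := by
        apply List.map_congr_left
        intro l hl
        rw [PySem.List.mem_pyRange_one] at hl
        have hq0l : q0 < l := by
          rw [hm] at hl; split at hl <;> omega
        exact gval_high x s l (by omega) (by omega) (by omega) (by omega) hq0l
      rw [hmap1, hmap2, PySem.List.sum_map_const_int, PySem.List.length_pyRange_one]
      have hcast : ((m + 1 - 1).toNat : Int) = m := by omega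
      have hisum : ((PySem.List.pyRange (m+1) (1+s) 1).map
          (fun l => PySem.Int.floordiv y l)).sum = isum y (m+1) s := by
        unfold isum
        have : (1 + s : Int) = s + 1 := by ring
        rw [this]
      rw [hcast, hisum]
      congr 1
      ring_nf
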